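-- pv_equiv track=rewrite | github.com/ldoolan/codeclass | lightsout.py | allOnes
-- ===== SOURCE A (Python) =====
-- def allOnes(L):
--     """
--     Accepts a list of integers L
--     Returns True if all L's elements are 1; false otherwise
--     """
--     # base case: list was actually empty; return False
--     if L == []:
--         return False
--     # as soon as you hit a 0, return False
--     elif L[0] == 0:
--         return False
--     # if the list just has one value, 1, return True so we don't iterate down to blank
--     elif len(L) == 1 and L[0] == 1:
--         return True
--     # recursive step
--     else:
--         return allOnes(L[1:])
-- ===== SOURCE B (Python) =====
-- def allOnes(L):
--     """
--     Accepts a list of integers L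
--     Returns True if all L's elements are 1; false otherwise
--     """
--     return bool(L) and all(x == 1 for x in L)
-- ===== Notes on version B (the rewrite author's own statement) =====
-- stated objective: simpler
-- what changed: Replaced the element-dropping recursion with a single closed-form check: nonempty and every element equals 1.
-- intended difference: On nonempty lists with no 0 whose last element is 1 but that contain some element other than 1 (e.g. [2,1]), A returns True because its recursion only ever compares elements against 0 before the last position; B returns False, which is what the docstring ('all L's elements are 1') intends. — e.g. on allOnes([2, 1]): A returns true, B returns false
import Mathlib
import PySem

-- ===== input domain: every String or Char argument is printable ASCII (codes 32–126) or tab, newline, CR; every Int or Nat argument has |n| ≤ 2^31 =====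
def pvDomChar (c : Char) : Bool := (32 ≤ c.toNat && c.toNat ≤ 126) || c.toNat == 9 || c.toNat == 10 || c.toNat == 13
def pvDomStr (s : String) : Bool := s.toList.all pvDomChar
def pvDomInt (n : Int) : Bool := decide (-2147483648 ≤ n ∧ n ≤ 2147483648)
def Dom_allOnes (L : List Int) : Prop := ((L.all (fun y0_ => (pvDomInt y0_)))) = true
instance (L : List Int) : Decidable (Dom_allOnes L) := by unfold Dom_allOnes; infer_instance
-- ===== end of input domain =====

-- B replaces A's element-dropping recursion with the closed-form "nonempty and every element equals 1";
-- D_ marks the inputs where A's recursion wrongly accepts non-1 elements and B returns the intended False.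


-- ===== PORT A =====
def allOnes (L : List Int) : Bool :=
  match L with
  | [] => false                                  -- if L == []: return False
  | x :: rest =>
    if x = 0 then false                          -- elif L[0] == 0: return False
    else if rest = [] ∧ x = 1 then true          -- elif len(L) == 1 and L[0] == 1: return True
    else allOnes rest                            -- else: return allOnes(L[1:])

-- ===== PORT B =====
def allOnes_alt (L : List Int) : Bool :=
  !L.isEmpty && L.all (fun x => x == 1)

-- ===== PRECONDITION & SPEC =====
-- On nonempty lists with no 0 whose last element is 1 but containing some element ≠ 1 (e.g. [2,1]),
-- A returns True (its recursion only compares against 0 before the last position); B returns False,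
-- which is what the docstring ("all L's elements are 1") intends.
def D_allOnes (L : List Int) : Prop :=
  L ≠ [] ∧ (0 : Int) ∉ L ∧ L.getLast? = some 1 ∧ ∃ x ∈ L, x ≠ 1
instance (L : List Int) : Decidable (D_allOnes L) := by unfold D_allOnes; infer_instance

def Spec_allOnes (L : List Int) (out : Bool) : Prop := ¬ D_allOnes L → out = allOnes_alt L
instance (L : List Int) (out : Bool) : Decidable (Spec_allOnes L out) := by unfold Spec_allOnes; infer_instance

def pvDiffWitness_allOnes : List Int := [2, 1]
def pvDiffWitnessOut_allOnes : Bool × Bool := (true, false)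

-- ===== CLAIM (what is proved, stated in full; the proofs are below) =====
def Claim_unchanged_allOnes : Prop := ∀ (L : List Int), Dom_allOnes L → Spec_allOnes L (allOnes L)
def Claim_changed_allOnes : Prop := Dom_allOnes (pvDiffWitness_allOnes) ∧ D_allOnes (pvDiffWitness_allOnes) ∧ allOnes (pvDiffWitness_allOnes) = pvDiffWitnessOut_allOnes.1 ∧ allOnes_alt (pvDiffWitness_allOnes) = pvDiffWitnessOut_allOnes.2 ∧ pvDiffWitnessOut_allOnes.1 ≠ pvDiffWitnessOut_allOnes.2
def Claim_exact_allOnes : Prop := ∀ (L : List Int), Dom_allOnes L → D_allOnes L → allOnes L ≠ allOnes_alt L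

-- ===== LEMMAS AND PROOFS =====
-- Characterisation of A: it returns true iff L is nonempty, contains no 0, and ends in 1.
theorem allOnes_char (L : List Int) :
    allOnes L = true ↔ L ≠ [] ∧ (0 : Int) ∉ L ∧ L.getLast? = some 1 := by
  induction L with
  | nil => simp [allOnes]
  | cons x rest ih =>
    cases rest with
    | nil =>
      by_cases hx : x = 0 <;> by_cases h1 : x = 1 <;>
        simp_all [allOnes]
    | cons y t =>
      by_cases hx : x = 0
      · simp [allOnes, hx]
      · have hstep : allOnes (x :: y :: t) = allOnes (y :: t) := by
          simp [allOnes, hx]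
        rw [hstep, ih]
        simp [Ne.symm hx, List.getLast?_cons_cons]

theorem allOnes_alt_char (L : List Int) :
    allOnes_alt L = true ↔ L ≠ [] ∧ ∀ x ∈ L, x = 1 := by
  cases L <;> simp [allOnes_alt]

-- ===== VERDICT (by name: the statements are the Claim_ definitions above) =====
theorem allOnes_spec : Claim_unchanged_allOnes := by
  intro L _ hD
  unfold D_allOnes at hD
  simp only [not_and, not_exists, not_ne_iff] at hD
  cases hA : allOnes L with
  | true =>
    obtain ⟨hne, h0, hlast⟩ := (allOnes_char L).mp hA
    have hall : ∀ x ∈ L, x = 1 := by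
      intro x hx
      by_contra hx1
      exact hx1 (hD hne h0 hlast x hx)
    exact ((allOnes_alt_char L).mpr ⟨hne, hall⟩).symm
  | false =>
    cases hB : allOnes_alt L with
    | false => rfl
    | true =>
      obtain ⟨hne, hall⟩ := (allOnes_alt_char L).mp hB
      have h0 : (0 : Int) ∉ L := fun h => by simpa using hall 0 h
      have hlast : L.getLast? = some 1 := by
        cases hL : L.getLast? with
        | none => simp_all [List.getLast?_eq_none_iff]
        | some v =>
          have hv : v ∈ L := List.mem_of_getLast? hL
          rw [hall v hv]
      rw [(allOnes_char L).mpr ⟨hne, h0, hlast⟩] at hA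
      exact absurd hA (by simp)

theorem allOnes_changed : Claim_changed_allOnes := by unfold Claim_changed_allOnes; decide

theorem allOnes_tight : Claim_exact_allOnes := by
  intro L _ hD
  obtain ⟨hne, h0, hlast, x, hx, hx1⟩ := hD
  rw [(allOnes_char L).mpr ⟨hne, h0, hlast⟩]
  intro h
  exact hx1 ((allOnes_alt_char L).mp h.symm |>.2 x hx)
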